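-- pv_equiv track=rewrite | github.com/yezhiyi9670/hackergame-2024-personal-writeup | part-2/powerful-regex/problem2.py | pack_choices
-- ===== SOURCE A (Python) =====
-- def common_prefix_suffix_len(items: list[str]):
--     prefix_len = 0
--     suffix_len = 0
--     k = 0
--     for i in range(0, min(map(len, items))):
--         if items[0][i] == '(': k += 1
--         if items[0][i] == ')': k -= 1
--         if len(set(map(lambda s: s[i], items))) <= 1:
--             if k == 0: prefix_len = i + 1
--         else:
--             break
--     k = 0
--     for i in range(1, min(map(len, items)) + 1):
--         if items[0][-i] == '(': k += 1
--         if items[0][-i] == ')': k -= 1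
--         if len(set(map(lambda s: s[-i], items))) <= 1:
--             if k == 0: suffix_len = i
--         else:
--             break
--     return prefix_len, suffix_len
--
-- def pack_choices(items: list[str]):
--     if len(items) == 0:
--         return ''
--
--     prefix_len, suffix_len = common_prefix_suffix_len(items)
--     min_len = min(map(len, items))
--     suffix_len = min(min_len - prefix_len, suffix_len)
--     prefix = items[0][0:prefix_len]
--     suffix = items[0][-suffix_len if suffix_len != 0 else len(items[0]):]
--     items = set([
--         item[prefix_len:-suffix_len if suffix_len != 0 else len(item)]
--         for item in items
--     ])
--
--     if len(items) == 1:
--         return prefix + next(iter(items)) + suffix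
--     return prefix + (
--         ('(' + '|'.join(sorted(items)) + ')')
--     ) + suffix
-- ===== SOURCE B (Python) =====
-- def _common(a, b):
--     # longest common prefix of two strings
--     n = min(len(a), len(b))
--     i = 0
--     while i < n and a[i] == b[i]:
--         i += 1
--     return a[:i]
--
-- def _best_cut(run):
--     # longest p with equally many '(' and ')' in run[:p] (p=0 always qualifies)
--     return max(p for p in range(len(run) + 1)
--                if run[:p].count('(') == run[:p].count(')'))
--
-- def pack_choices(items: list[str]):
--     if len(items) == 0:
--         return ''
--     pre_run = items[0]
--     for s in items[1:]:
--         pre_run = _common(pre_run, s)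
--     suf_run = items[0][::-1]
--     for s in items[1:]:
--         suf_run = _common(suf_run, s[::-1])
--     prefix_len = _best_cut(pre_run)
--     min_len = min(len(s) for s in items)
--     suffix_len = min(min_len - prefix_len, _best_cut(suf_run))
--     first = items[0]
--     prefix = first[:prefix_len]
--     suffix = first[len(first) - suffix_len:]
--     cores = sorted({s[prefix_len:len(s) - suffix_len] for s in items})
--     if len(cores) == 1:
--         return prefix + cores[0] + suffix
--     return prefix + '(' + '|'.join(cores) + ')' + suffix
-- ===== Notes on version B (the rewrite author's own statement) =====
-- stated objective: alternative
-- what changed: A scans columns left-to-right/right-to-left with a running bracket counter, a set-based uniformity test and break, recording cut points on the fly; B instead folds a binary longest-common-prefix over the list (and over the reversed strings for the suffix) and then picks the cut as the maximum p over range(len(run)+1) whose slice has equally many '(' and ')' counted by str.count, with no running counter and no break.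
import Mathlib
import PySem

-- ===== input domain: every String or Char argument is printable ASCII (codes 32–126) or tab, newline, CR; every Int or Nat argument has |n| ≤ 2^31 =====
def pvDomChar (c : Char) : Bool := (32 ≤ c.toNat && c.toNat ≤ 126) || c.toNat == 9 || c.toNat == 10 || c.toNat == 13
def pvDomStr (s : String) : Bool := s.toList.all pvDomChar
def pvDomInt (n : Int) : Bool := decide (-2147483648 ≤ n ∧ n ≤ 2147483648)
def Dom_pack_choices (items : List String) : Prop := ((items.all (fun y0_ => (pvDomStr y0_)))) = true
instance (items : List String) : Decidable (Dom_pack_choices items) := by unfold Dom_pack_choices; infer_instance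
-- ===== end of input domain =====

-- B replaces A's fused column scans (running bracket counter + set uniformity test + break) by a
-- pairwise common-prefix fold (on reversed strings for the suffix) followed by a max over the
-- bracket-count-balanced cut points; objective: alternative.

-- min(map(len, items)); Python min raises on an empty list, but it is only called on nonempty lists
def pvMinLen (ls : List (List Char)) : Nat :=
  match ls.map List.length with
  | [] => 0
  | x :: xs => xs.foldl min x

-- s[i]; every call site has the index in range, so the default is never taken and this is exact
def pvCharAt (s : List Char) (i : Int) : Char := (PySem.List.pyGet? s i).getD ' '

-- ===== PORT A =====

-- len(set(map(lambda s: s[i], items))) <= 1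
def pvUni (its : List (List Char)) (i : Int) : Bool :=
  decide ((PySem.Set.ofList (its.map (fun s => pvCharAt s i))).length ≤ 1)

-- A's two sequential k-updates: if c=='(': k+=1 ; if c==')': k-=1
def aK (c : Char) (k : Int) : Int :=
  if c = ')' then (if c = '(' then k + 1 else k) - 1 else (if c = '(' then k + 1 else k)

-- A's first loop: fused scan (k updates, uniformity check, record, break)
def aPrefGo (its : List (List Char)) (f : List Char) (m i : Nat) (k : Int) (plen : Nat) : Nat :=
  if i < m then
    if pvUni its (i : Int) then
      aPrefGo its f m (i + 1) (aK (pvCharAt f (i : Int)) k)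
        (if aK (pvCharAt f (i : Int)) k = 0 then i + 1 else plen)
    else plen
  else plen
termination_by m - i

-- A's second loop: i runs over range(1, m+1), indexing with -i
def aSufGo (its : List (List Char)) (f : List Char) (m i : Nat) (k : Int) (slen : Nat) : Nat :=
  if i < m + 1 then
    if pvUni its (-(i : Int)) then
      aSufGo its f m (i + 1) (aK (pvCharAt f (-(i : Int))) k)
        (if aK (pvCharAt f (-(i : Int))) k = 0 then i else slen)
    else slen
  else slen
termination_by (m + 1) - i

def aBody (its : List (List Char)) : String :=
  let f := its.headD []
  let m := pvMinLen its
  let plen := aPrefGo its f m 0 0 0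
  let slen := min (m - plen) (aSufGo its f m 1 0 0)
  let pre := PySem.List.slice f (some (0 : Int)) (some (plen : Int))
  let suf := PySem.List.slice f (some (if slen ≠ 0 then -(slen : Int) else (f.length : Int))) none
  let cores := PySem.Set.ofList (its.map (fun s =>
    String.ofList (PySem.List.slice s (some (plen : Int))
      (some (if slen ≠ 0 then -(slen : Int) else (s.length : Int))))))
  if cores.length = 1 then
    String.ofList pre ++ cores.headD "" ++ String.ofList suf
  else
    String.ofList pre ++ "(" ++ PySem.Str.join "|" (PySem.List.sorted cores (fun x => x) false) ++ ")" ++ String.ofList suf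

def pack_choices (items : List String) : String :=
  if items.length = 0 then "" else aBody (items.map String.toList)

-- ===== PORT B =====

-- _common's while loop: scan while i < n and a[i] == b[i]
def bCommonGo (a b : List Char) (n i : Nat) : Nat :=
  if i < n && (pvCharAt a (i : Int) == pvCharAt b (i : Int)) then bCommonGo a b n (i + 1) else i
termination_by n - i
decreasing_by simp_all; omega

-- _common(a, b) = a[:i]  (i ≥ 0, so the slice is List.take, exact)
def bCommon2 (a b : List Char) : List Char :=
  a.take (bCommonGo a b (min a.length b.length) 0)

-- _best_cut: max(p for p in range(len(run)+1) if run[:p].count('(') == run[:p].count(')')).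
-- p = 0 always satisfies the condition, so the filtered list contains 0 and Python's max over the
-- nonempty generator equals the fold of max starting at 0.
def bBestCut (r : List Char) : Nat :=
  ((List.range (r.length + 1)).filter
    (fun p => (r.take p).count '(' == (r.take p).count ')')).foldl max 0

def bBody (its : List (List Char)) : String :=
  let f := its.headD []
  let preRun := its.tail.foldl bCommon2 f
  let sufRun := its.tail.foldl (fun acc s => bCommon2 acc s.reverse) f.reverse
  let plen := bBestCut preRun
  let m := pvMinLen its
  let slen := min (m - plen) (bBestCut sufRun)
  let pre := f.take plen
  let suf := PySem.List.slice f (some ((f.length - slen : Nat) : Int)) none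
  let sc := PySem.List.sorted
    (PySem.Set.ofList (its.map (fun s =>
      String.ofList (PySem.List.slice s (some (plen : Int)) (some ((s.length - slen : Nat) : Int))))))
    (fun x => x) false
  if sc.length = 1 then
    String.ofList pre ++ sc.headD "" ++ String.ofList suf
  else
    String.ofList pre ++ "(" ++ PySem.Str.join "|" sc ++ ")" ++ String.ofList suf

def pack_choices_alt (items : List String) : String :=
  if items.length = 0 then "" else bBody (items.map String.toList)

-- ===== PRECONDITION & SPEC =====
def Spec_pack_choices (items : List String) (out : String) : Prop := out = pack_choices_alt items
instance (items : List String) (out : String) : Decidable (Spec_pack_choices items out) := by unfold Spec_pack_choices; infer_instance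

-- ===== CLAIM (what is proved, stated in full; the proofs are below) =====
def Claim_equal_pack_choices : Prop := ∀ (items : List String), Dom_pack_choices items → Spec_pack_choices items (pack_choices items)

-- ===== LEMMAS AND PROOFS =====

-- proof-layer intermediate loops: common-run scan and balanced-cut selection, used to relate the
-- two ports (neither port calls these)
def pRunPre (its : List (List Char)) (f : List Char) (m L : Nat) : Nat :=
  if L < m && its.all (fun s => pvCharAt s (L : Int) == pvCharAt f (L : Int)) then
    pRunPre its f m (L + 1)
  else L
termination_by m - L
decreasing_by simp_all; omega

def pRunSuf (its : List (List Char)) (f : List Char) (m L : Nat) : Nat :=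
  if L < m && its.all (fun s => pvCharAt s (-((L : Int) + 1)) == pvCharAt f (-((L : Int) + 1))) then
    pRunSuf its f m (L + 1)
  else L
termination_by m - L
decreasing_by simp_all; omega

def pBal (c : Char) (bal : Int) : Int :=
  bal + (if c == '(' then 1 else 0) - (if c == ')' then 1 else 0)

def pSelPre (f : List Char) (L i : Nat) (bal : Int) (plen : Nat) : Nat :=
  if i < L then
    pSelPre f L (i + 1) (pBal (pvCharAt f (i : Int)) bal)
      (if pBal (pvCharAt f (i : Int)) bal = 0 then i + 1 else plen)
  else plen
termination_by L - i

def pSelSuf (f : List Char) (L i : Nat) (bal : Int) (slen : Nat) : Nat :=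
  if i < L + 1 then
    pSelSuf f L (i + 1) (pBal (pvCharAt f (-(i : Int))) bal)
      (if pBal (pvCharAt f (-(i : Int))) bal = 0 then i else slen)
  else slen
termination_by (L + 1) - i

-- running bracket balance of f[:p]
def pBalAt (f : List Char) (p : Nat) : Int :=
  ((f.take p).count '(' : Int) - ((f.take p).count ')' : Int)

theorem setlen_le_one_iff {α : Type} [BEq α] [LawfulBEq α] (l : List α) :
    (PySem.Set.ofList l).length ≤ 1 ↔ ∀ a ∈ l, ∀ b ∈ l, a = b := by
  constructor
  · intro h a ha b hb
    have ha' : a ∈ PySem.Set.ofList l := (PySem.Set.mem_ofList l a).mpr ha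
    have hb' : b ∈ PySem.Set.ofList l := (PySem.Set.mem_ofList l b).mpr hb
    cases e : PySem.Set.ofList l with
    | nil => rw [e] at ha'; simp at ha'
    | cons x t =>
        rw [e] at h ha' hb'
        have ht : t = [] := by
          cases t with
          | nil => rfl
          | cons y u => simp at h
        subst ht
        simp at ha' hb'
        rw [ha', hb']
  · intro h
    cases e : PySem.Set.ofList l with
    | nil => simp
    | cons x t =>
        cases t with
        | nil => simp
        | cons y u =>
            exfalso
            have hx : x ∈ l := (PySem.Set.mem_ofList l x).mp (by rw [e]; simp)
            have hy : y ∈ l := (PySem.Set.mem_ofList l y).mp (by rw [e]; simp)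
            have hnd := PySem.Set.nodup_ofList l
            rw [e] at hnd
            have : x = y := h x hx y hy
            simp [this] at hnd

theorem pvUni_iff (its : List (List Char)) (f : List Char) (hf : f ∈ its) (i : Int) :
    pvUni its i = its.all (fun s => pvCharAt s i == pvCharAt f i) := by
  unfold pvUni
  have h1 : ((PySem.Set.ofList (its.map (fun s => pvCharAt s i))).length ≤ 1)
      ↔ (∀ s ∈ its, pvCharAt s i = pvCharAt f i) := by
    rw [setlen_le_one_iff]
    constructor
    · intro h s hs
      exact h _ (List.mem_map_of_mem hs) _ (List.mem_map_of_mem hf)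
    · intro h a ha b hb
      obtain ⟨sa, hsa, rfl⟩ := List.mem_map.mp ha
      obtain ⟨sb, hsb, rfl⟩ := List.mem_map.mp hb
      rw [h sa hsa, h sb hsb]
  rw [Bool.eq_iff_iff]
  simp only [decide_eq_true_eq, List.all_eq_true, beq_iff_eq]
  exact h1

theorem pRunPre_ge (its : List (List Char)) (f : List Char) (m L : Nat) :
    L ≤ pRunPre its f m L := by
  suffices H : ∀ n L, m - L = n → L ≤ pRunPre its f m L from H (m - L) L rfl
  intro n
  induction n with
  | zero =>
      intro L h0
      rw [pRunPre]
      have : ¬ L < m := by omega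
      simp [this]
  | succ n ih =>
      intro L h
      rw [pRunPre]
      split
      · have := ih (L + 1) (by omega)
        omega
      · exact le_refl L

theorem pRunSuf_ge (its : List (List Char)) (f : List Char) (m L : Nat) :
    L ≤ pRunSuf its f m L := by
  suffices H : ∀ n L, m - L = n → L ≤ pRunSuf its f m L from H (m - L) L rfl
  intro n
  induction n with
  | zero =>
      intro L h0
      rw [pRunSuf]
      have : ¬ L < m := by omega
      simp [this]
  | succ n ih =>
      intro L h
      rw [pRunSuf]
      split
      · have := ih (L + 1) (by omega)
        omega
      · exact le_refl L

theorem bal_step_eq (c : Char) (k : Int) : aK c k = pBal c k := by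
  unfold aK pBal
  by_cases h1 : c = '('
  · simp [h1]
  · by_cases h2 : c = ')' <;> simp [h1, h2]

theorem pref_eq (its : List (List Char)) (f : List Char) (hf : f ∈ its) (m : Nat) :
    ∀ i k plen, aPrefGo its f m i k plen = pSelPre f (pRunPre its f m i) i k plen := by
  suffices H : ∀ n i k plen, m - i = n →
      aPrefGo its f m i k plen = pSelPre f (pRunPre its f m i) i k plen from
    fun i k plen => H (m - i) i k plen rfl
  intro n
  induction n with
  | zero =>
      intro i k plen h0
      have hm : ¬ i < m := by omega
      rw [aPrefGo, if_neg hm, pRunPre]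
      rw [if_neg (by simp [hm])]
      rw [pSelPre, if_neg (by omega)]
  | succ n ih =>
      intro i k plen h
      have hm : i < m := by omega
      rw [aPrefGo, if_pos hm]
      by_cases hu : pvUni its (i : Int) = true
      · rw [if_pos hu]
        have hall : its.all (fun s => pvCharAt s (i : Int) == pvCharAt f (i : Int)) = true := by
          rw [← pvUni_iff its f hf]; exact hu
        have hrun : pRunPre its f m i = pRunPre its f m (i + 1) := by
          rw [pRunPre, if_pos (by simp [hm, hall])]
        have hge : i + 1 ≤ pRunPre its f m (i + 1) := pRunPre_ge its f m (i + 1)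
        rw [hrun, pSelPre, if_pos (show i < pRunPre its f m (i + 1) from by omega)]
        rw [← bal_step_eq]
        exact ih (i + 1) _ _ (by omega)
      · rw [if_neg hu]
        have hall : ¬ its.all (fun s => pvCharAt s (i : Int) == pvCharAt f (i : Int)) = true := by
          rw [← pvUni_iff its f hf]; exact hu
        have hrun : pRunPre its f m i = i := by
          rw [pRunPre, if_neg (by simp [hall])]
        rw [hrun, pSelPre, if_neg (by omega)]

theorem suf_eq (its : List (List Char)) (f : List Char) (hf : f ∈ its) (m : Nat) :
    ∀ i k slen, 1 ≤ i → aSufGo its f m i k slen = pSelSuf f (pRunSuf its f m (i - 1)) i k slen := by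
  suffices H : ∀ n i k slen, 1 ≤ i → (m + 1) - i = n →
      aSufGo its f m i k slen = pSelSuf f (pRunSuf its f m (i - 1)) i k slen from
    fun i k slen h1 => H ((m + 1) - i) i k slen h1 rfl
  intro n
  induction n with
  | zero =>
      intro i k slen h1 h0
      have hm : ¬ i < m + 1 := by omega
      rw [aSufGo, if_neg hm, pRunSuf]
      rw [if_neg (by simp; omega)]
      rw [pSelSuf, if_neg (by omega)]
  | succ n ih =>
      intro i k slen h1 h
      have hm : i < m + 1 := by omega
      have hcast : -((((i - 1 : Nat)) : Int) + 1) = -((i : Int)) := by omega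
      rw [aSufGo, if_pos hm]
      by_cases hu : pvUni its (-(i : Int)) = true
      · rw [if_pos hu]
        have hall : its.all (fun s => pvCharAt s (-(i : Int)) == pvCharAt f (-(i : Int))) = true := by
          rw [← pvUni_iff its f hf]; exact hu
        have hrun : pRunSuf its f m (i - 1) = pRunSuf its f m i := by
          rw [pRunSuf]
          rw [if_pos]
          · rw [show i - 1 + 1 = i from by omega]
          · simp only [hcast, Bool.and_eq_true, decide_eq_true_eq]
            exact ⟨by omega, hall⟩
        have hge : i ≤ pRunSuf its f m i := pRunSuf_ge its f m i
        rw [hrun, pSelSuf, if_pos (show i < pRunSuf its f m i + 1 from by omega)]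
        rw [← bal_step_eq]
        have := ih (i + 1) (aK (pvCharAt f (-(i : Int))) k)
          (if aK (pvCharAt f (-(i : Int))) k = 0 then i else slen) (by omega) (by omega)
        rw [show i + 1 - 1 = i from by omega] at this
        exact this
      · rw [if_neg hu]
        have hall : ¬ its.all (fun s => pvCharAt s (-(i : Int)) == pvCharAt f (-(i : Int))) = true := by
          rw [← pvUni_iff its f hf]; exact hu
        have hrun : pRunSuf its f m (i - 1) = i - 1 := by
          rw [pRunSuf, if_neg]
          simp only [hcast, Bool.and_eq_true, decide_eq_true_eq]
          intro hc
          exact hall hc.2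
        rw [hrun, pSelSuf, if_neg (by omega)]

theorem foldl_min_le_init (xs : List Nat) (x : Nat) : xs.foldl min x ≤ x := by
  induction xs generalizing x with
  | nil => exact le_refl x
  | cons y ys ih => exact le_trans (ih (min x y)) (Nat.min_le_left x y)

theorem foldl_min_le_mem (xs : List Nat) (x a : Nat) (ha : a ∈ xs) : xs.foldl min x ≤ a := by
  induction xs generalizing x with
  | nil => simp at ha
  | cons y ys ih =>
      rcases List.mem_cons.mp ha with rfl | ha'
      · exact le_trans (foldl_min_le_init ys (min x a)) (Nat.min_le_right x a)
      · exact ih (min x y) ha'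

theorem pvMinLen_le (its : List (List Char)) (s : List Char) (hs : s ∈ its) :
    pvMinLen its ≤ s.length := by
  cases its with
  | nil => simp at hs
  | cons h t =>
      have : pvMinLen (h :: t) = (t.map List.length).foldl min h.length := by
        simp [pvMinLen]
      rw [this]
      rcases List.mem_cons.mp hs with rfl | hs'
      · exact foldl_min_le_init _ _
      · exact foldl_min_le_mem _ _ _ (List.mem_map_of_mem hs')

theorem slice_stop_eq (s : List Char) (p k : Nat) (h : k ≤ s.length) :
    PySem.List.slice s (some (p : Int)) (some (if k ≠ 0 then -(k : Int) else (s.length : Int)))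
      = PySem.List.slice s (some (p : Int)) (some ((s.length - k : Nat) : Int)) := by
  by_cases hk : k = 0
  · subst hk; simp
  · rw [if_pos hk]
    have h1 : PySem.List.clampIdx s.length ((s.length - k : Nat) : Int) = s.length - k := by
      rw [PySem.List.clampIdx_natCast]; omega
    simp only [PySem.List.slice, PySem.List.clampIdx_neg_natCast s.length k (by omega), h1]

theorem suf_slice_eq (f : List Char) (k : Nat) :
    PySem.List.slice f (some (if k ≠ 0 then -(k : Int) else (f.length : Int))) none
      = PySem.List.slice f (some ((f.length - k : Nat) : Int)) none := by
  by_cases hk : k = 0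
  · subst hk; simp
  · rw [if_pos hk, PySem.List.slice_from_neg_natCast f k (by omega),
      PySem.List.slice_from_natCast]

theorem sorted_singleton_id (a : String) :
    PySem.List.sorted [a] (fun x => x) false = [a] :=
  List.perm_singleton.mp (PySem.List.sorted_perm [a] (fun x => x) false)

theorem cores_eq (its : List (List Char)) (plen slen : Nat)
    (hle : ∀ s ∈ its, slen ≤ s.length) :
    its.map (fun s => String.ofList (PySem.List.slice s (some (plen : Int))
        (some (if slen ≠ 0 then -(slen : Int) else (s.length : Int)))))
      = its.map (fun s => String.ofList (PySem.List.slice s (some (plen : Int))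
        (some ((s.length - slen : Nat) : Int)))) := by
  apply List.map_congr_left
  intro s hs'
  rw [slice_stop_eq s plen slen (hle s hs')]

theorem tail_eq (pre suf : List Char) (cores : List String) :
    (if cores.length = 1 then
        String.ofList pre ++ cores.headD "" ++ String.ofList suf
      else
        String.ofList pre ++ "(" ++ PySem.Str.join "|" (PySem.List.sorted cores (fun x => x) false) ++ ")" ++ String.ofList suf)
      = (if (PySem.List.sorted cores (fun x => x) false).length = 1 then
        String.ofList pre ++ (PySem.List.sorted cores (fun x => x) false).headD "" ++ String.ofList suf
      else
        String.ofList pre ++ "(" ++ PySem.Str.join "|" (PySem.List.sorted cores (fun x => x) false) ++ ")" ++ String.ofList suf) := by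
  rw [PySem.List.length_sorted]
  by_cases hc : cores.length = 1
  · rw [if_pos hc, if_pos hc]
    obtain ⟨a, ha⟩ := List.length_eq_one_iff.mp hc
    rw [ha, sorted_singleton_id]
  · rw [if_neg hc, if_neg hc]

-- == relating the p-layer to B's port ==

-- in-range access: pvCharAt is getD
theorem pvCharAt_nat (s : List Char) (i : Nat) (h : i < s.length) :
    pvCharAt s (i : Int) = s.getD i ' ' := by
  simp [pvCharAt, PySem.List.pyGet?, PySem.List.pyIdx?, h, List.getD]

-- negative access reads the reverse: s[-i] = s.reverse[i-1] for 1 ≤ i ≤ len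
theorem pvCharAt_neg (s : List Char) (i : Nat) (h1 : 1 ≤ i) (h2 : i ≤ s.length) :
    pvCharAt s (-(i : Int)) = pvCharAt s.reverse ((i - 1 : Nat) : Int) := by
  unfold pvCharAt
  rw [PySem.List.pyGet?_neg_natCast s i (by omega) h2, PySem.List.pyGet?_natCast]
  have hlt : s.length - i < s.length := by omega
  have hlt' : i - 1 < s.reverse.length := by simp; omega
  rw [List.getElem?_eq_getElem hlt, List.getElem?_eq_getElem hlt']
  simp only [Option.getD_some, List.getElem_reverse]
  congr 1
  omega

theorem pBalAt_step (f : List Char) (i : Nat) (h : i < f.length) :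
    pBal (pvCharAt f (i : Int)) (pBalAt f i) = pBalAt f (i + 1) := by
  rw [pvCharAt_nat f i h]
  have ht : f.take (i + 1) = f.take i ++ [f[i]] := by
    rw [List.take_succ, List.getElem?_eq_getElem h]
    rfl
  simp only [pBal, pBalAt, ht, List.count_append, List.getD,
    List.getElem?_eq_getElem h, Option.getD_some]
  simp only [List.count_singleton]
  by_cases h1 : f[i] = '('
  · simp [h1]; push_cast; ring
  · by_cases h2 : f[i] = ')'
    · simp [h1, h2, beq_iff_eq]; push_cast; ring
    · simp [h1, h2, beq_iff_eq]

-- the selection loop computes a fold of max over the balanced cut points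
theorem pSelPre_eq_foldl (f : List Char) (L : Nat) (hL : L ≤ f.length) :
    ∀ n i plen, L - i = n → plen ≤ i →
      pSelPre f L i (pBalAt f i) plen
        = ((List.range' (i + 1) (L - i)).filter (fun p => decide (pBalAt f p = 0))).foldl max plen := by
  intro n
  induction n with
  | zero =>
      intro i plen h0 hp
      rw [pSelPre, if_neg (by omega)]
      rw [show L - i = 0 from h0]
      simp
  | succ n ih =>
      intro i plen h0 hp
      have hi : i < L := by omega
      rw [pSelPre, if_pos hi]
      rw [pBalAt_step f i (by omega)]
      rw [show L - i = (L - (i + 1)) + 1 from by omega, List.range'_succ]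
      rw [List.filter_cons]
      by_cases hb : pBalAt f (i + 1) = 0
      · rw [if_pos hb]
        rw [if_pos (by simp [hb])]
        rw [List.foldl_cons]
        rw [ih (i + 1) (i + 1) (by omega) (le_refl _)]
        congr 1
        omega
      · rw [if_neg hb]
        rw [if_neg (by simp [hb])]
        exact ih (i + 1) plen (by omega) (by omega)

-- _best_cut over a prefix of f computes the same fold
theorem bBestCut_take (f : List Char) (L : Nat) (hL : L ≤ f.length) :
    bBestCut (f.take L)
      = ((List.range' 1 L).filter (fun p => decide (pBalAt f p = 0))).foldl max 0 := by
  unfold bBestCut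
  have hlen : (f.take L).length = L := by simp [hL]
  rw [hlen]
  have hfe : (List.range (L + 1)).filter
        (fun p => ((f.take L).take p).count '(' == ((f.take L).take p).count ')')
      = (List.range (L + 1)).filter (fun p => decide (pBalAt f p = 0)) := by
    apply List.filter_congr
    intro p hp
    have hpL : p ≤ L := by
      have := List.mem_range.mp hp
      omega
    rw [List.take_take, min_eq_left hpL]
    rw [Bool.eq_iff_iff]
    simp only [beq_iff_eq, decide_eq_true_eq, pBalAt]
    omega
  rw [hfe]
  rw [List.range_eq_range', show L + 1 = L + 1 from rfl]
  rw [List.range'_succ]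
  rw [List.filter_cons]
  rw [if_pos (by simp [pBalAt])]
  rw [List.foldl_cons]
  simp

theorem pSelPre_eq_bestCut (f : List Char) (L : Nat) (hL : L ≤ f.length) :
    pSelPre f L 0 0 0 = bBestCut (f.take L) := by
  have h0 : pBalAt f 0 = 0 := by simp [pBalAt]
  rw [bBestCut_take f L hL]
  have := pSelPre_eq_foldl f L hL L 0 0 rfl (le_refl 0)
  rw [h0] at this
  simpa using this

-- the suffix selection loop is the prefix selection loop over the reverse
theorem pSelSuf_eq_pSelPre (f : List Char) (L : Nat) (hL : L ≤ f.length) :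
    ∀ n i k slen, 1 ≤ i → (L + 1) - i = n →
      pSelSuf f L i k slen = pSelPre f.reverse L (i - 1) k slen := by
  intro n
  induction n with
  | zero =>
      intro i k slen h1 h0
      rw [pSelSuf, if_neg (by omega), pSelPre, if_neg (by omega)]
  | succ n ih =>
      intro i k slen h1 h0
      have hi : i < L + 1 := by omega
      rw [pSelSuf, if_pos hi, pSelPre, if_pos (show i - 1 < L by omega)]
      rw [← pvCharAt_neg f i h1 (by omega)]
      rw [show i - 1 + 1 = i from by omega]
      have := ih (i + 1) (pBal (pvCharAt f (-(i : Int))) k)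
        (if pBal (pvCharAt f (-(i : Int))) k = 0 then i else slen) (by omega) (by omega)
      rw [show i + 1 - 1 = i from by omega] at this
      exact this

theorem pv_all_congr {α : Type} (l : List α) (p q : α → Bool)
    (h : ∀ a ∈ l, p a = q a) : l.all p = l.all q := by
  rw [Bool.eq_iff_iff]
  simp only [List.all_eq_true]
  exact ⟨fun H a ha => by rw [← h a ha]; exact H a ha,
    fun H a ha => by rw [h a ha]; exact H a ha⟩

-- the suffix run scan is the prefix run scan over the reversed list
theorem pRunSuf_eq_pRunPre (its : List (List Char)) (f : List Char) (m : Nat)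
    (hm : ∀ s ∈ its, m ≤ s.length) (hf : m ≤ f.length) :
    ∀ n L, m - L = n →
      pRunSuf its f m L = pRunPre (its.map List.reverse) f.reverse m L := by
  intro n
  induction n with
  | zero =>
      intro L h0
      have hnm : ¬ L < m := by omega
      rw [pRunSuf, pRunPre]
      simp [hnm]
  | succ n ih =>
      intro L h0
      have hL : L < m := by omega
      have hcond : its.all (fun s => pvCharAt s (-((L : Int) + 1)) == pvCharAt f (-((L : Int) + 1)))
          = (its.map List.reverse).all (fun s => pvCharAt s (L : Int) == pvCharAt f.reverse (L : Int)) := by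
        rw [List.all_map]
        apply pv_all_congr
        intro s hs
        have h1 : -((L : Int) + 1) = -(((L + 1 : Nat)) : Int) := by push_cast; ring
        simp only [Function.comp]
        rw [h1, pvCharAt_neg s (L + 1) (by omega) (by have := hm s hs; omega),
          pvCharAt_neg f (L + 1) (by omega) (by omega)]
        simp
      rw [pRunSuf, pRunPre, hcond]
      by_cases hc : (its.map List.reverse).all (fun s => pvCharAt s (L : Int) == pvCharAt f.reverse (L : Int)) = true
      · rw [if_pos (by simp [hL, hc]), if_pos (by simp [hL, hc])]
        exact ih (L + 1) (by omega)
      · rw [if_neg (by simp [hc]), if_neg (by simp [hc])]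

-- == characterizing B's common-prefix machinery ==

-- the spec of a maximal-common-run length against a reference f and a bound family
def RunSpec (its : List (List Char)) (f : List Char) (j : Nat) : Prop :=
  (∀ s ∈ its, j ≤ s.length) ∧
  (∀ x < j, ∀ s ∈ its, pvCharAt s (x : Int) = pvCharAt f (x : Int)) ∧
  ((∃ s ∈ its, j = s.length) ∨ ∃ s ∈ its, pvCharAt s (j : Int) ≠ pvCharAt f (j : Int))

theorem RunSpec_unique (its : List (List Char)) (f : List Char) (j1 j2 : Nat)
    (h1 : RunSpec its f j1) (h2 : RunSpec its f j2) : j1 = j2 := by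
  obtain ⟨hb1, hc1, hm1⟩ := h1
  obtain ⟨hb2, hc2, hm2⟩ := h2
  by_contra hne
  rcases Nat.lt_or_ge j1 j2 with hlt | hge
  · rcases hm1 with ⟨s, hs, he⟩ | ⟨s, hs, hne'⟩
    · have := hb2 s hs; omega
    · exact hne' (hc2 j1 hlt s hs)
  · have hlt : j2 < j1 := by omega
    rcases hm2 with ⟨s, hs, he⟩ | ⟨s, hs, hne'⟩
    · have := hb1 s hs; omega
    · exact hne' (hc1 j2 hlt s hs)

theorem pvMinLen_mem (its : List (List Char)) (h : its ≠ []) :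
    ∃ s ∈ its, pvMinLen its = s.length := by
  cases its with
  | nil => exact absurd rfl h
  | cons a t =>
      have he : pvMinLen (a :: t) = (t.map List.length).foldl min a.length := by
        simp [pvMinLen]
      rw [he]
      clear he h
      induction t generalizing a with
      | nil => exact ⟨a, by simp⟩
      | cons b u ih =>
          simp only [List.map_cons, List.foldl_cons]
          by_cases hab : a.length ≤ b.length
          · rw [min_eq_left hab]
            obtain ⟨s, hs, he⟩ := ih a
            refine ⟨s, ?_, he⟩
            rcases List.mem_cons.mp hs with h | h
            · simp [h]
            · simp [h]
          · rw [min_eq_right (by omega)]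
            obtain ⟨s, hs, he⟩ := ih b
            refine ⟨s, ?_, he⟩
            rcases List.mem_cons.mp hs with h | h
            · simp [h]
            · simp [h]

theorem pRunPre_spec (its : List (List Char)) (f : List Char) (hne : its ≠ [])
    (hf : f ∈ its) :
    RunSpec its f (pRunPre its f (pvMinLen its) 0) := by
  set m := pvMinLen its with hm
  suffices H : ∀ n L, m - L = n → L ≤ m →
      (∀ x < L, ∀ s ∈ its, pvCharAt s (x : Int) = pvCharAt f (x : Int)) →
      RunSpec its f (pRunPre its f m L) from
    H m 0 (by omega) (by omega) (by omega)
  intro n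
  induction n with
  | zero =>
      intro L h0 hLm hcols
      have hLm' : L = m := by omega
      rw [pRunPre, if_neg (by simp; omega)]
      refine ⟨fun s hs => by have := pvMinLen_le its s hs; omega,
        hcols, Or.inl ?_⟩
      obtain ⟨s, hs, he⟩ := pvMinLen_mem its hne
      exact ⟨s, hs, by omega⟩
  | succ n ih =>
      intro L h0 hLm hcols
      have hL : L < m := by omega
      rw [pRunPre]
      by_cases hc : its.all (fun s => pvCharAt s (L : Int) == pvCharAt f (L : Int)) = true
      · rw [if_pos (by simp [hL, hc])]
        apply ih (L + 1) (by omega) (by omega)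
        intro x hx s hs
        rcases Nat.lt_or_ge x L with hxL | hxL
        · exact hcols x hxL s hs
        · have hxL' : x = L := by omega
          subst hxL'
          have := (List.all_eq_true.mp hc) s hs
          exact beq_iff_eq.mp this
      · rw [if_neg (by simp [hc])]
        refine ⟨fun s hs => by have := pvMinLen_le its s hs; omega, hcols, Or.inr ?_⟩
        simp only [List.all_eq_true, not_forall] at hc
        obtain ⟨s, hs, hne'⟩ := hc
        exact ⟨s, hs, fun he => hne' (by simp [he])⟩

-- bounds from the spec
theorem pRunPre_le_len (its : List (List Char)) (f : List Char) (hne : its ≠ [])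
    (hf : f ∈ its) : pRunPre its f (pvMinLen its) 0 ≤ f.length :=
  (pRunPre_spec its f hne hf).1 f hf

-- reading inside a take
theorem pvCharAt_take (f : List Char) (L x : Nat) (h : x < L) :
    pvCharAt (f.take L) (x : Int) = pvCharAt f (x : Int) := by
  simp only [pvCharAt, PySem.List.pyGet?_natCast]
  rw [List.getElem?_take_of_lt h]

-- the spec of the _common while loop
theorem bCommonGo_spec (a b : List Char) (n : Nat) :
    ∀ d i, n - i = d → i ≤ n →
      i ≤ bCommonGo a b n i ∧ bCommonGo a b n i ≤ n ∧
      (∀ x, i ≤ x → x < bCommonGo a b n i →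
        pvCharAt a (x : Int) = pvCharAt b (x : Int)) ∧
      (bCommonGo a b n i = n ∨
        pvCharAt a ((bCommonGo a b n i : Nat) : Int) ≠ pvCharAt b ((bCommonGo a b n i : Nat) : Int)) := by
  intro d
  induction d with
  | zero =>
      intro i h0 hi
      have : i = n := by omega
      rw [bCommonGo, if_neg (by simp; omega)]
      exact ⟨le_refl i, by omega, fun x hx1 hx2 => by omega, Or.inl this⟩
  | succ d ih =>
      intro i h0 hi
      have hin : i < n := by omega
      rw [bCommonGo]
      by_cases hc : pvCharAt a (i : Int) = pvCharAt b (i : Int)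
      · rw [if_pos (by simp [hin, hc])]
        obtain ⟨ih1, ih2, ih3, ih4⟩ := ih (i + 1) (by omega) (by omega)
        refine ⟨by omega, ih2, ?_, ih4⟩
        intro x hx1 hx2
        rcases Nat.lt_or_ge x (i + 1) with hx | hx
        · have : x = i := by omega
          subst this; exact hc
        · exact ih3 x hx hx2
      · rw [if_neg (by simp [hc])]
        exact ⟨le_refl i, by omega, fun x hx1 hx2 => by omega, Or.inr hc⟩

-- one fold step of bCommon2 preserves the invariant
theorem bCommon2_inv (f acc s : List Char) (seen : List (List Char))
    (hacc : acc = f.take acc.length) (hspec : RunSpec (f :: seen) f acc.length) :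
    bCommon2 acc s = f.take (bCommon2 acc s).length ∧
      RunSpec (f :: (seen ++ [s])) f (bCommon2 acc s).length := by
  obtain ⟨hb, hcols, hmax⟩ := hspec
  have haccf : acc.length ≤ f.length := by
    conv_lhs => rw [hacc]
    simp
  obtain ⟨h1, h2, h3, h4⟩ :=
    bCommonGo_spec acc s (min acc.length s.length) (min acc.length s.length) 0 (by omega) (by omega)
  set j := bCommonGo acc s (min acc.length s.length) 0 with hj
  have haccx : ∀ x < acc.length, pvCharAt acc (x : Int) = pvCharAt f (x : Int) := by
    intro x hx
    conv_lhs => rw [hacc]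
    exact pvCharAt_take f acc.length x hx
  have hres : bCommon2 acc s = f.take j := by
    rw [bCommon2, ← hj]
    conv_lhs => rw [hacc]
    rw [List.take_take, min_eq_left (by omega)]
  have hlen : (bCommon2 acc s).length = j := by
    rw [hres]; simp; omega
  rw [hlen]
  refine ⟨hres, ?_, ?_, ?_⟩
  · intro t ht
    rcases List.mem_cons.mp ht with rfl | ht'
    · have := hb t (by simp); omega
    · rcases List.mem_append.mp ht' with h' | h'
      · have := hb t (by simp [h']); omega
      · have hts : t = s := by simpa using h'
        subst hts; omega
  · intro x hx t ht
    have hxa : x < acc.length := by omega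
    rcases List.mem_cons.mp ht with rfl | ht'
    · rfl
    · rcases List.mem_append.mp ht' with h' | h'
      · exact hcols x hxa t (by simp [h'])
      · have hts : t = s := by simpa using h'
        subst hts
        rw [← h3 x (by omega) hx]
        exact haccx x hxa
  · by_cases hjn : j = min acc.length s.length
    · by_cases hls : acc.length ≤ s.length
      · have hja : j = acc.length := by omega
        rcases hmax with ⟨t, ht, he⟩ | ⟨t, ht, hne⟩
        · refine Or.inl ⟨t, ?_, by omega⟩
          rcases List.mem_cons.mp ht with rfl | h'
          · simp
          · simp [h']
        · refine Or.inr ⟨t, ?_, by rw [hja]; exact hne⟩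
          rcases List.mem_cons.mp ht with rfl | h'
          · simp
          · simp [h']
      · have hjs : j = s.length := by omega
        exact Or.inl ⟨s, by simp, hjs⟩
    · have hjm : pvCharAt acc (j : Int) ≠ pvCharAt s (j : Int) := h4.resolve_left hjn
      have hja : j < acc.length := by omega
      exact Or.inr ⟨s, by simp, fun he => hjm (by rw [haccx j hja]; exact he.symm)⟩

-- the whole fold satisfies the invariant
theorem fold_inv (f : List Char) (t : List (List Char)) :
    ∀ (seen : List (List Char)) (acc : List Char),
      acc = f.take acc.length → RunSpec (f :: seen) f acc.length →
      t.foldl bCommon2 acc = f.take (t.foldl bCommon2 acc).length ∧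
        RunSpec (f :: (seen ++ t)) f (t.foldl bCommon2 acc).length := by
  induction t with
  | nil =>
      intro seen acc h1 h2
      simpa using ⟨h1, h2⟩
  | cons s u ih =>
      intro seen acc h1 h2
      obtain ⟨h1', h2'⟩ := bCommon2_inv f acc s seen h1 h2
      have := ih (seen ++ [s]) (bCommon2 acc s) h1' h2'
      simpa [List.append_assoc] using this

-- B's pairwise common-prefix fold equals the column scan of the p-layer
theorem fold_eq_run (f : List Char) (t : List (List Char)) :
    t.foldl bCommon2 f = f.take (pRunPre (f :: t) f (pvMinLen (f :: t)) 0) := by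
  have hbase1 : f = f.take f.length := by simp
  have hbase2 : RunSpec (f :: ([] : List (List Char))) f f.length := by
    refine ⟨by intro s hs; simp at hs; simp [hs], by intro x hx s hs; simp at hs; simp [hs], Or.inl ⟨f, by simp⟩⟩
  obtain ⟨h1, h2⟩ := fold_inv f t [] f hbase1 hbase2
  simp only [List.nil_append] at h2
  have hu := RunSpec_unique (f :: t) f _ _ h2 (pRunPre_spec (f :: t) f (by simp) (by simp))
  rw [h1, hu]

theorem body_eq (its : List (List Char)) (f : List Char) (t : List (List Char))
    (hits : its = f :: t) : aBody its = bBody its := by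
  subst hits
  have hne : (f :: t) ≠ [] := by simp
  have hf : f ∈ f :: t := by simp
  set m := pvMinLen (f :: t) with hm
  have hmf : m ≤ f.length := pvMinLen_le _ f hf
  -- prefix length
  have hR : pRunPre (f :: t) f m 0 ≤ f.length := pRunPre_le_len _ f hne hf
  have hplen : aPrefGo (f :: t) f m 0 0 0 = bBestCut (t.foldl bCommon2 f) := by
    rw [pref_eq (f :: t) f hf m 0 0 0, fold_eq_run f t, ← hm,
      pSelPre_eq_bestCut f _ hR]
  -- suffix length: reversed list
  have hmap : pvMinLen ((f :: t).map List.reverse) = m := by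
    rw [hm]
    have hmm : (f :: t).map (List.length ∘ List.reverse) = (f :: t).map List.length := by
      apply List.map_congr_left
      intro s _
      simp [Function.comp]
    unfold pvMinLen
    rw [List.map_map, hmm]
  have hrs : pRunSuf (f :: t) f m 0 = pRunPre ((f :: t).map List.reverse) f.reverse m 0 :=
    pRunSuf_eq_pRunPre (f :: t) f m (fun s hs => pvMinLen_le _ s hs) hmf (m - 0) 0 rfl
  have hR' : pRunPre ((f :: t).map List.reverse) f.reverse m 0 ≤ f.length := by
    have := pRunPre_le_len ((f :: t).map List.reverse) f.reverse (by simp) (by simp)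
    rw [hmap] at this
    simpa using this
  have hslen : aSufGo (f :: t) f m 1 0 0
      = bBestCut (t.foldl (fun acc s => bCommon2 acc s.reverse) f.reverse) := by
    rw [suf_eq (f :: t) f hf m 1 0 0 (le_refl 1)]
    simp only [Nat.sub_self]
    rw [pSelSuf_eq_pSelPre f (pRunSuf (f :: t) f m 0) (by rw [hrs]; simpa using hR')
      (pRunSuf (f :: t) f m 0 + 1 - 1) 1 0 0 (le_refl 1) rfl]
    simp only [Nat.sub_self]
    rw [hrs]
    have hfold : t.foldl (fun acc s => bCommon2 acc s.reverse) f.reverse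
        = (t.map List.reverse).foldl bCommon2 f.reverse := by rw [List.foldl_map]
    rw [hfold, fold_eq_run f.reverse (t.map List.reverse)]
    have hcons : (f.reverse :: t.map List.reverse) = (f :: t).map List.reverse := by simp
    rw [hcons, hmap]
    exact (pSelPre_eq_bestCut f.reverse _ (by simpa using hR')).symm ▸ rfl
  -- assemble
  have hle : ∀ s ∈ (f :: t),
      min (m - bBestCut (t.foldl bCommon2 f))
        (bBestCut (t.foldl (fun acc s => bCommon2 acc s.reverse) f.reverse)) ≤ s.length :=
    fun s hs =>
      le_trans (le_trans (Nat.min_le_left _ _) (Nat.sub_le _ _)) (pvMinLen_le _ s hs)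
  simp only [aBody, bBody, List.headD_cons, List.tail_cons, ← hm, hplen, hslen,
    suf_slice_eq, cores_eq _ _ _ hle, PySem.List.slice_zero_start, PySem.List.slice_to_natCast]
  exact tail_eq _ _ _

-- ===== VERDICT (by name: the statement is the Claim_ definition above) =====
theorem pack_choices_spec : Claim_equal_pack_choices := by
  intro items _
  unfold Spec_pack_choices pack_choices pack_choices_alt
  cases items with
  | nil => rfl
  | cons h t =>
      simp only [List.length_cons]
      rw [if_neg (by simp), if_neg (by simp)]
      exact body_eq _ _ _ rfl
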